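-- pv_equiv track=rewrite | github.com/eroge-69/PyToExe | python-files/eciesse.py | choose_backup_prefix_nibble
-- ===== SOURCE A (Python) =====
-- from typing import List, Optional, Tuple
--
-- TARGET_BACKUP  = 0xE7
--
-- def sum_nibbles(b: int) -> int:
--     return ((b >> 4) & 0xF) + (b & 0xF)
--
-- def find_all_prefixes_for_want(want:int) -> List[int]:
--     res = []
--     for P in range(256):
--         if sum_nibbles(P) == want:
--             res.append(P)
--     return res
--
-- def choose_backup_prefix_nibble(data_bytes:List[int], primary_pref:Optional[int]) -> Optional[int]:
--     s_data = sum(sum_nibbles(b) for b in data_bytes)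
--     target_n = sum_nibbles(TARGET_BACKUP)
--     want = target_n - s_data
--     if want < 0 or want > 30:
--         return None
--     candidates = find_all_prefixes_for_want(want)
--     if not candidates:
--         return None
--     # preferred rule: same low-nibble as primary, high-nibble = primary_high - 1
--     if primary_pref is not None:
--         p_low = primary_pref & 0x0F
--         p_high = (primary_pref >> 4) & 0x0F
--         if p_high > 0:
--             preferred = ((p_high - 1) << 4) | p_low
--             if preferred in candidates:
--                 return preferred
--         # else choose candidate that shares low nibble if exists
--         same_low = [c for c in candidates if (c & 0x0F) == p_low]
--         if same_low:
--             return max(same_low)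
--     # otherwise return highest candidate
--     return max(candidates)
-- ===== SOURCE B (Python) =====
-- from typing import List, Optional
--
-- TARGET_BACKUP = 0xE7  # nibble sum 21
--
-- def choose_backup_prefix_nibble(data_bytes: List[int], primary_pref: Optional[int]) -> Optional[int]:
--     want = 21 - sum(((b >> 4) & 0xF) + (b & 0xF) for b in data_bytes)
--     if want < 0 or want > 30:
--         return None
--     h = min(15, want)
--     top = (h << 4) | (want - h)
--     if primary_pref is not None:
--         p_low = primary_pref & 0x0F
--         p_high = (primary_pref >> 4) & 0x0F
--         if p_high > 0 and (p_high - 1) + p_low == want: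
--             return ((p_high - 1) << 4) | p_low
--         if 0 <= want - p_low <= 15:
--             return ((want - p_low) << 4) | p_low
--     return top
-- ===== Notes on version B (the rewrite author's own statement) =====
-- stated objective: simpler
-- what changed: Replaced the 256-iteration candidate scan, list building, membership test and max() calls with closed-form nibble arithmetic: the top candidate is (min(15,want)<<4)|(want-min(15,want)), the preferred check becomes (p_high-1)+p_low==want, and the shared-low-nibble candidate is computed directly as ((want-p_low)<<4)|p_low when 0<=want-p_low<=15.
import Mathlib
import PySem

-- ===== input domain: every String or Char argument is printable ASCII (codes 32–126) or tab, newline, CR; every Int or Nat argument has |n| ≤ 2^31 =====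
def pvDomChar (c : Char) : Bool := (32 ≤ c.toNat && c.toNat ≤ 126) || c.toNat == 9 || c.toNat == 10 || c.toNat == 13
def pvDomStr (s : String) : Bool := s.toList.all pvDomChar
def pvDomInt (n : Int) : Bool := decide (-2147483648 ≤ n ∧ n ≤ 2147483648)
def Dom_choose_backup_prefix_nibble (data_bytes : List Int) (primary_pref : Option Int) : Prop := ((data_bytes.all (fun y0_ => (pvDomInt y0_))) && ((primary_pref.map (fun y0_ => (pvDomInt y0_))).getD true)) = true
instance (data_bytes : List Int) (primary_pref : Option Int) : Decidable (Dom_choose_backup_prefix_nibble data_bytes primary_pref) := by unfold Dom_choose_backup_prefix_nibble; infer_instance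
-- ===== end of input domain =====

-- B replaces A's 256-iteration candidate scan, membership test and max() calls with closed-form
-- nibble arithmetic (objective: simpler); same return value everywhere.

-- ===== PORT A =====
-- (b >> 4) & 0xF and b & 0xF ported with the Python-exact PySem.Int.band / arithmetic >>> ;
-- ((p_high-1) << 4) | p_low ported with <<< and the Python-exact PySem.Int.bor.
def sum_nibbles (b : Int) : Int :=
  PySem.Int.band (b >>> (4 : Nat)) 15 + PySem.Int.band b 15

def find_all_prefixes_for_want (want : Int) : List Int :=
  (PySem.List.pyRange 0 256 1).foldl
    (fun res P => if sum_nibbles P = want then res ++ [P] else res) []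

def choose_backup_prefix_nibble (data_bytes : List Int) (primary_pref : Option Int) : Option Int :=
  let s_data := (data_bytes.map (fun b => sum_nibbles b)).sum
  let target_n := sum_nibbles 231      -- TARGET_BACKUP = 0xE7
  let want := target_n - s_data
  if want < 0 ∨ want > 30 then none
  else
    let candidates := find_all_prefixes_for_want want
    if candidates = [] then none
    else
      match primary_pref with
      | some p =>
        let p_low := PySem.Int.band p 15
        let p_high := PySem.Int.band (p >>> (4 : Nat)) 15
        -- Python: if p_high > 0: preferred = ...; if preferred in candidates: return preferred
        if p_high > 0 ∧ (PySem.Int.bor ((p_high - 1) <<< (4 : Nat)) p_low) ∈ candidates then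
          some (PySem.Int.bor ((p_high - 1) <<< (4 : Nat)) p_low)
        else
          let same_low := candidates.filter (fun c => PySem.Int.band c 15 = p_low)
          if same_low ≠ [] then PySem.List.max? same_low (fun x => x)   -- max(same_low); list nonempty here
          else PySem.List.max? candidates (fun x => x)                  -- max(candidates); list nonempty here
      | none => PySem.List.max? candidates (fun x => x)

-- ===== PORT B =====
def choose_backup_prefix_nibble_alt (data_bytes : List Int) (primary_pref : Option Int) : Option Int :=
  let want := 21 - (data_bytes.map (fun b : Int => PySem.Int.band (b >>> (4 : Nat)) 15 + PySem.Int.band b 15)).sum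
  if want < 0 ∨ want > 30 then none
  else
    let h := min 15 want
    let top := PySem.Int.bor (h <<< (4 : Nat)) (want - h)
    match primary_pref with
    | some p =>
      let p_low := PySem.Int.band p 15
      let p_high := PySem.Int.band (p >>> (4 : Nat)) 15
      if p_high > 0 ∧ (p_high - 1) + p_low = want then
        some (PySem.Int.bor ((p_high - 1) <<< (4 : Nat)) p_low)
      else if 0 ≤ want - p_low ∧ want - p_low ≤ 15 then
        some (PySem.Int.bor ((want - p_low) <<< (4 : Nat)) p_low)
      else some top
    | none => some top

-- ===== PRECONDITION & SPEC =====
def Spec_choose_backup_prefix_nibble (data_bytes : List Int) (primary_pref : Option Int) (out : Option Int) : Prop := out = choose_backup_prefix_nibble_alt data_bytes primary_pref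
instance (data_bytes : List Int) (primary_pref : Option Int) (out : Option Int) : Decidable (Spec_choose_backup_prefix_nibble data_bytes primary_pref out) := by unfold Spec_choose_backup_prefix_nibble; infer_instance

-- ===== CLAIM (what is proved, stated in full; the proofs are below) =====
def Claim_equal_choose_backup_prefix_nibble : Prop := ∀ (data_bytes : List Int) (primary_pref : Option Int), Dom_choose_backup_prefix_nibble data_bytes primary_pref → Spec_choose_backup_prefix_nibble data_bytes primary_pref (choose_backup_prefix_nibble data_bytes primary_pref)

-- ===== LEMMAS AND PROOFS =====

-- x & 15 always lands in [0, 16) (both for nonnegative and negative x)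
lemma band15_bounds (a : Int) : 0 ≤ PySem.Int.band a 15 ∧ PySem.Int.band a 15 < 16 := by
  by_cases h : 0 ≤ a
  · have h15 : (0:Int) ≤ 15 := by norm_num
    simp only [PySem.Int.band, if_pos h, if_pos h15]
    have := Nat.and_le_right (n := a.toNat) (m := (15:Int).toNat)
    constructor
    · positivity
    · have : a.toNat &&& (15:Int).toNat ≤ 15 := by simpa using this
      omega
  · have h15 : (0:Int) ≤ 15 := by norm_num
    simp only [PySem.Int.band, if_neg h, if_pos h15]
    have := Nat.and_le_left (n := (15:Int).toNat) (m := (-a - 1).toNat)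
    have h2 : (15:Int).toNat &&& (-a - 1).toNat ≤ 15 := by simpa using this
    omega

-- (h << 4) | l = 16*h + l for nibbles h, l
set_option maxRecDepth 4000 in
lemma bor_nibbles_fin : ∀ h l : Fin 16,
    PySem.Int.bor (((h : Nat) : Int) <<< (4 : Nat)) ((l : Nat) : Int) = 16 * (h : Nat) + (l : Nat) := by
  decide

lemma bor_nibbles {h l : Int} (h0 : 0 ≤ h) (h1 : h < 16) (l0 : 0 ≤ l) (l1 : l < 16) :
    PySem.Int.bor (h <<< (4 : Nat)) l = 16 * h + l := by
  obtain ⟨hn, rfl⟩ := Int.eq_ofNat_of_zero_le h0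
  obtain ⟨ln, rfl⟩ := Int.eq_ofNat_of_zero_le l0
  have := bor_nibbles_fin ⟨hn, by omega⟩ ⟨ln, by omega⟩
  simpa using this

-- nibble decomposition of every byte value
set_option maxRecDepth 4000 in
lemma byte_fin : ∀ y : Fin 256,
    sum_nibbles ((y : Nat) : Int) = (((y : Nat) / 16 : Nat) : Int) + (((y : Nat) % 16 : Nat) : Int) ∧
    PySem.Int.band ((y : Nat) : Int) 15 = (((y : Nat) % 16 : Nat) : Int) := by
  decide

lemma byte_decomp {y : Int} (h0 : 0 ≤ y) (h1 : y < 256) :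
    ∃ h l : Int, 0 ≤ h ∧ h < 16 ∧ 0 ≤ l ∧ l < 16 ∧ y = 16 * h + l ∧
      sum_nibbles y = h + l ∧ PySem.Int.band y 15 = l := by
  obtain ⟨n, rfl⟩ := Int.eq_ofNat_of_zero_le h0
  have hn : n < 256 := by omega
  have := byte_fin ⟨n, hn⟩
  refine ⟨((n / 16 : Nat) : Int), ((n % 16 : Nat) : Int), ?_, ?_, ?_, ?_, ?_, ?_, ?_⟩ <;>
    simp_all <;> omega

lemma nibble_facts {h l : Int} (h0 : 0 ≤ h) (h1 : h < 16) (l0 : 0 ≤ l) (l1 : l < 16) :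
    sum_nibbles (16 * h + l) = h + l ∧ PySem.Int.band (16 * h + l) 15 = l := by
  obtain ⟨h', l', a0, a1, b0, b1, hy, hs, hb⟩ :=
    byte_decomp (y := 16 * h + l) (by omega) (by omega)
  have : h' = h ∧ l' = l := by omega
  obtain ⟨rfl, rfl⟩ := this
  exact ⟨hs, hb⟩

-- the loop in find_all_prefixes_for_want is a filter of range(256)
lemma cand_eq_filter (w : Int) :
    find_all_prefixes_for_want w = (PySem.List.pyRange 0 256 1).filter (fun P => sum_nibbles P = w) := by
  have := PySem.List.foldl_append_if (fun P => decide (sum_nibbles P = w)) (fun x => x)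
      (PySem.List.pyRange 0 256 1) []
  simpa [find_all_prefixes_for_want] using this

lemma mem_cand {w y : Int} :
    y ∈ find_all_prefixes_for_want w ↔ (0 ≤ y ∧ y < 256 ∧ sum_nibbles y = w) := by
  rw [cand_eq_filter]
  simp [List.mem_filter, PySem.List.mem_pyRange_one]
  tauto

lemma nibble_mem_cand {w h l : Int} (h0 : 0 ≤ h) (h1 : h < 16) (l0 : 0 ≤ l) (l1 : l < 16)
    (hs : h + l = w) : 16 * h + l ∈ find_all_prefixes_for_want w := by
  refine mem_cand.mpr ⟨by omega, by omega, ?_⟩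
  rw [(nibble_facts h0 h1 l0 l1).1, hs]

lemma cand_ne_nil {w : Int} (hw0 : 0 ≤ w) (hw1 : w ≤ 30) : find_all_prefixes_for_want w ≠ [] := by
  have := nibble_mem_cand (w := w) (h := min 15 w) (l := w - min 15 w)
    (by omega) (by omega) (by omega) (by omega) (by omega)
  exact List.ne_nil_of_mem this

-- max(candidates) maximises the high nibble
lemma max_cand {w : Int} (hw0 : 0 ≤ w) (hw1 : w ≤ 30) :
    PySem.List.max? (find_all_prefixes_for_want w) (fun x => x)
      = some (16 * min 15 w + (w - min 15 w)) := by
  have ht : 16 * min 15 w + (w - min 15 w) ∈ find_all_prefixes_for_want w :=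
    nibble_mem_cand (by omega) (by omega) (by omega) (by omega) (by omega)
  cases hm : PySem.List.max? (find_all_prefixes_for_want w) (fun x => x) with
  | none => exact absurd ((PySem.List.max?_eq_none_iff _ _).mp hm) (cand_ne_nil hw0 hw1)
  | some m =>
    have hmem := PySem.List.max?_mem hm
    have hle : 16 * min 15 w + (w - min 15 w) ≤ m := PySem.List.max?_isMax hm _ ht
    obtain ⟨y0, y1, hsum⟩ := mem_cand.mp hmem
    obtain ⟨h', l', a0, a1, b0, b1, hy, hs, hb⟩ := byte_decomp y0 y1
    congr 1
    omega

-- the same-low-nibble sublist is nonempty exactly when 0 ≤ w - pl ≤ 15 …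
lemma same_low_empty_iff {w pl : Int} (hw0 : 0 ≤ w) (hw1 : w ≤ 30) (hpl0 : 0 ≤ pl) (hpl1 : pl < 16) :
    ((find_all_prefixes_for_want w).filter (fun c => PySem.Int.band c 15 = pl) = []) ↔
      ¬ (0 ≤ w - pl ∧ w - pl ≤ 15) := by
  constructor
  · intro hnil hf
    have hm : 16 * (w - pl) + pl ∈
        (find_all_prefixes_for_want w).filter (fun c => PySem.Int.band c 15 = pl) := by
      rw [List.mem_filter]
      refine ⟨nibble_mem_cand (by omega) (by omega) (by omega) (by omega) (by omega), ?_⟩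
      simp [(nibble_facts (h := w - pl) (l := pl) (by omega) (by omega) (by omega) (by omega)).2]
    rw [hnil] at hm
    simp at hm
  · intro hf
    rw [List.eq_nil_iff_forall_not_mem]
    intro y hy
    rw [List.mem_filter] at hy
    obtain ⟨hyc, hyl⟩ := hy
    obtain ⟨y0, y1, hsum⟩ := mem_cand.mp hyc
    obtain ⟨h', l', a0, a1, b0, b1, hyeq, hs, hb⟩ := byte_decomp y0 y1
    simp at hyl
    omega

-- … and then it holds the single value ((w-pl) << 4) | pl
lemma max_same_low {w pl : Int} (hw0 : 0 ≤ w) (hw1 : w ≤ 30) (hpl0 : 0 ≤ pl) (hpl1 : pl < 16)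
    (hf0 : 0 ≤ w - pl) (hf1 : w - pl ≤ 15) :
    PySem.List.max? ((find_all_prefixes_for_want w).filter (fun c => PySem.Int.band c 15 = pl)) (fun x => x)
      = some (16 * (w - pl) + pl) := by
  have hm : 16 * (w - pl) + pl ∈
      (find_all_prefixes_for_want w).filter (fun c => PySem.Int.band c 15 = pl) := by
    rw [List.mem_filter]
    refine ⟨nibble_mem_cand (by omega) (by omega) (by omega) (by omega) (by omega), ?_⟩
    simp [(nibble_facts (h := w - pl) (l := pl) (by omega) (by omega) (by omega) (by omega)).2]
  cases hmax : PySem.List.max? ((find_all_prefixes_for_want w).filter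
      (fun c => PySem.Int.band c 15 = pl)) (fun x => x) with
  | none =>
    rw [PySem.List.max?_eq_none_iff] at hmax
    rw [hmax] at hm
    simp at hm
  | some m =>
    have hmem := PySem.List.max?_mem hmax
    rw [List.mem_filter] at hmem
    obtain ⟨hyc, hyl⟩ := hmem
    obtain ⟨y0, y1, hsum⟩ := mem_cand.mp hyc
    obtain ⟨h', l', a0, a1, b0, b1, hyeq, hs, hb⟩ := byte_decomp y0 y1
    simp at hyl
    congr 1
    omega

lemma ports_agree (data_bytes : List Int) (primary_pref : Option Int) :
    choose_backup_prefix_nibble data_bytes primary_pref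
      = choose_backup_prefix_nibble_alt data_bytes primary_pref := by
  have h21 : sum_nibbles 231 = 21 := by decide
  unfold choose_backup_prefix_nibble choose_backup_prefix_nibble_alt
  dsimp only
  rw [h21]
  rw [show (data_bytes.map (fun b : Int => PySem.Int.band (b >>> (4 : Nat)) 15 + PySem.Int.band b 15)).sum
        = (data_bytes.map (fun b => sum_nibbles b)).sum from rfl]
  generalize (21 : Int) - (data_bytes.map (fun b => sum_nibbles b)).sum = w
  by_cases hw : w < 0 ∨ w > 30
  · rw [if_pos hw, if_pos hw]
  · rw [if_neg hw, if_neg hw]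
    push_neg at hw
    obtain ⟨hw0, hw1⟩ := hw
    have hw0' : 0 ≤ w := by omega
    rw [if_neg (cand_ne_nil hw0' hw1)]
    have htop : PySem.Int.bor (min 15 w <<< (4 : Nat)) (w - min 15 w)
        = 16 * min 15 w + (w - min 15 w) :=
      bor_nibbles (by omega) (by omega) (by omega) (by omega)
    cases primary_pref with
    | none =>
      dsimp only
      rw [max_cand hw0' hw1, htop]
    | some p =>
      dsimp only
      have hpl := band15_bounds p
      have hph := band15_bounds (p >>> (4 : Nat))
      set pl : Int := PySem.Int.band p 15 with hpl'
      set ph : Int := PySem.Int.band (p >>> (4 : Nat)) 15 with hph'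
      have hcond : (ph > 0 ∧ (PySem.Int.bor ((ph - 1) <<< (4 : Nat)) pl) ∈ find_all_prefixes_for_want w)
          ↔ (ph > 0 ∧ (ph - 1) + pl = w) := by
        by_cases hph0 : ph > 0
        · rw [bor_nibbles (by omega) (by omega) (by omega) (by omega), mem_cand]
          have := (nibble_facts (h := ph - 1) (l := pl) (by omega) (by omega) (by omega) (by omega)).1
          constructor
          · rintro ⟨_, _, _, hsum⟩; omega
          · rintro ⟨_, hsum⟩; exact ⟨hph0, by omega, by omega, by omega⟩
        · simp [hph0]
      by_cases hA : ph > 0 ∧ (ph - 1) + pl = w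
      · rw [if_pos (hcond.mpr hA), if_pos hA]
      · rw [if_neg (hcond.not.mpr hA), if_neg hA]
        by_cases hf : 0 ≤ w - pl ∧ w - pl ≤ 15
        · have hne : (find_all_prefixes_for_want w).filter (fun c => PySem.Int.band c 15 = pl) ≠ [] := by
            rw [ne_eq, same_low_empty_iff hw0' hw1 (by omega) (by omega)]
            simpa using hf
          rw [if_pos hne, if_pos hf,
            max_same_low hw0' hw1 (by omega) (by omega) hf.1 hf.2,
            bor_nibbles (by omega) (by omega) (by omega) (by omega)]
        · have hnil : (find_all_prefixes_for_want w).filter (fun c => PySem.Int.band c 15 = pl) = [] :=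
            (same_low_empty_iff hw0' hw1 (by omega) (by omega)).mpr hf
          rw [if_neg (by simpa using hnil), if_neg hf, max_cand hw0' hw1, htop]

-- ===== VERDICT (by name: the statement is the Claim_ definition above) =====
theorem choose_backup_prefix_nibble_spec : Claim_equal_choose_backup_prefix_nibble := by
  intro db pp _
  exact ports_agree db pp
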